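-- pv_equiv track=rewrite | github.com/MrBrantCode/unitest_baseline | mut_generate/mist_train_cf/cf_17859/solution.py | generate_odd_fibonacci_numbers
-- ===== SOURCE A (Python) =====
-- def generate_odd_fibonacci_numbers(n, min_val, max_val):
--     """
--     Generates an array of the first n odd Fibonacci numbers within a given range.
--
--     Args:
--         n (int): The number of odd Fibonacci numbers to generate.
--         min_val (int): The minimum value of the range (inclusive).
--         max_val (int): The maximum value of the range (inclusive).
--
--     Returns:
--         list: An array of the first n odd Fibonacci numbers within the given range.
--     """
--     fib_sequence = []
--     a, b = 0, 1
--     while len(fib_sequence) < n: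
--         a, b = b, a + b
--         if a > max_val:
--             break
--         if a > min_val and a % 2 != 0:
--             fib_sequence.append(a)
--     return fib_sequence
-- ===== SOURCE B (Python) =====
-- def generate_odd_fibonacci_numbers(n, min_val, max_val):
--     # Phase 1: generate every Fibonacci term (skipping the initial 0) up to max_val.
--     fibs = []
--     a, b = 0, 1
--     while True:
--         a, b = b, a + b
--         if a > max_val:
--             break
--         fibs.append(a)
--     # Phase 2: filter odd terms strictly above min_val, stopping at n results.
--     result = []
--     for v in fibs:
--         if len(result) >= n:
--             break
--         if v > min_val and v % 2 != 0:
--             result.append(v)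
--     return result
-- ===== Notes on version B (the rewrite author's own statement) =====
-- stated objective: alternative
-- what changed: B splits A's fused loop into two passes: it first materialises the full list of Fibonacci terms up to max_val, then a separate filtering pass collects odd terms strictly above min_val until n results are found.
import Mathlib
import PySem

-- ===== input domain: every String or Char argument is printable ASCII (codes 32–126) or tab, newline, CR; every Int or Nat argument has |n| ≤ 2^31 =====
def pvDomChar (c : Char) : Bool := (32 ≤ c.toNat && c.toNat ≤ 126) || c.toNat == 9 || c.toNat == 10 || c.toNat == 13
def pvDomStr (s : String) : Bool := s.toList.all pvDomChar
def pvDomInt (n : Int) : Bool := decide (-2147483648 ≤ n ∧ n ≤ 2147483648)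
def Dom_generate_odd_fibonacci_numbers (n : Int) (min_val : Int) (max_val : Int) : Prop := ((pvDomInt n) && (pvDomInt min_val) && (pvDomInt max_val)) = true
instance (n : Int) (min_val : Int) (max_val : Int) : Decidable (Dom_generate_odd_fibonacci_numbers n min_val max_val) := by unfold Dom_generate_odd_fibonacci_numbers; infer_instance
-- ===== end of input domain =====

-- B splits A's fused generate-and-filter loop into two passes (generate Fibonacci terms up to
-- max_val, then filter odds above min_val up to n results); alternative decomposition, same cost.


-- ===== PORT A =====
-- A's while-loop: guard len < n, advance (a,b) := (b, a+b), break on a > max_val, append odd terms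
-- strictly above min_val.  The proof arguments 0 ≤ a ≤ b, 1 ≤ b record the loop invariant of the
-- Fibonacci state and are used only for termination.
def loopA (n min_val max_val : Int) (a b : Int) (acc : List Int)
    (ha : 0 ≤ a) (hab : a ≤ b) (hb : 1 ≤ b) : List Int :=
  if (acc.length : Int) < n then
    if b > max_val then acc
    else loopA n min_val max_val b (a + b)
      (if b > min_val ∧ b % 2 ≠ 0 then acc ++ [b] else acc)
      (by omega) (by omega) (by omega)
  else acc
termination_by (2 * max_val + 2 - (a + b)).toNat
decreasing_by omega

def generate_odd_fibonacci_numbers (n : Int) (min_val : Int) (max_val : Int) : List Int :=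
  loopA n min_val max_val 0 1 [] (by omega) (by omega) (by omega)

-- ===== PORT B =====
-- Phase 1 of B: the list of successive Fibonacci terms (the advanced a-values) up to max_val.
def fibsUpTo (max_val : Int) (a b : Int) (ha : 0 ≤ a) (hab : a ≤ b) (hb : 1 ≤ b) : List Int :=
  if b > max_val then []
  else b :: fibsUpTo max_val b (a + b) (by omega) (by omega) (by omega)
termination_by (2 * max_val + 2 - (a + b)).toNat
decreasing_by omega

-- Phase 2 of B: scan the list, break once the result has length n, keep odd terms above min_val.
def pickOdd (n min_val : Int) (acc : List Int) : List Int → List Int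
  | [] => acc
  | v :: vs =>
    if (acc.length : Int) ≥ n then acc
    else pickOdd n min_val (if v > min_val ∧ v % 2 ≠ 0 then acc ++ [v] else acc) vs

def generate_odd_fibonacci_numbers_alt (n : Int) (min_val : Int) (max_val : Int) : List Int :=
  pickOdd n min_val [] (fibsUpTo max_val 0 1 (by omega) (by omega) (by omega))

-- ===== PRECONDITION & SPEC =====
def Spec_generate_odd_fibonacci_numbers (n : Int) (min_val : Int) (max_val : Int) (out : List Int) : Prop := out = generate_odd_fibonacci_numbers_alt n min_val max_val
instance (n : Int) (min_val : Int) (max_val : Int) (out : List Int) : Decidable (Spec_generate_odd_fibonacci_numbers n min_val max_val out) := by unfold Spec_generate_odd_fibonacci_numbers; infer_instance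

-- ===== CLAIM (what is proved, stated in full; the proofs are below) =====
def Claim_equal_generate_odd_fibonacci_numbers : Prop := ∀ (n : Int) (min_val : Int) (max_val : Int), Dom_generate_odd_fibonacci_numbers n min_val max_val → Spec_generate_odd_fibonacci_numbers n min_val max_val (generate_odd_fibonacci_numbers n min_val max_val)

-- ===== LEMMAS AND PROOFS =====
-- The fused loop equals filtering the generated list, for every Fibonacci state and accumulator.
theorem loopA_eq_pickOdd (k : Nat) (n min_val max_val a b : Int) (acc : List Int)
    (ha : 0 ≤ a) (hab : a ≤ b) (hb : 1 ≤ b)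
    (hk : (2 * max_val + 2 - (a + b)).toNat ≤ k) :
    loopA n min_val max_val a b acc ha hab hb =
      pickOdd n min_val acc (fibsUpTo max_val a b ha hab hb) := by
  induction k generalizing a b acc with
  | zero =>
    have hbig : b > max_val := by omega
    rw [loopA, fibsUpTo, if_pos hbig, if_pos hbig]; simp only [pickOdd]
    split <;> rfl
  | succ k ih =>
    rw [loopA, fibsUpTo]
    by_cases hbig : b > max_val
    · rw [if_pos hbig, if_pos hbig]; simp only [pickOdd]
      split <;> rfl
    · rw [if_neg hbig, if_neg hbig]; simp only [pickOdd]
      by_cases hlen : (acc.length : Int) < n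
      · have hge : ¬((acc.length : Int) ≥ n) := by omega
        rw [if_pos hlen, if_neg hge]
        exact ih b (a + b) _ (by omega) (by omega) (by omega) (by omega)
      · have hge : (acc.length : Int) ≥ n := by omega
        rw [if_neg hlen, if_pos hge]

-- ===== VERDICT (by name: the statement is the Claim_ definition above) =====
theorem generate_odd_fibonacci_numbers_spec : Claim_equal_generate_odd_fibonacci_numbers := by
  intro n min_val max_val _
  unfold Spec_generate_odd_fibonacci_numbers generate_odd_fibonacci_numbers
    generate_odd_fibonacci_numbers_alt
  exact loopA_eq_pickOdd (2 * max_val + 2 - 1).toNat n min_val max_val 0 1 []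
    (by omega) (by omega) (by omega) (by omega)
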